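-- pv_equiv track=rewrite | github.com/glamp/turboprop | turboprop/tool_comparison_engine.py | _find_task_relevant_tools
-- ===== SOURCE A (Python) =====
-- from typing import Any, Dict, List, Optional
--
-- def _find_task_relevant_tools(task_description: str, max_tools: int) -> List[str]:
--     """Find tools relevant to a specific task (mock implementation)."""
--     # Mock implementation - would use actual search
--     task_lower = task_description.lower()
--
--     candidates = []
--
--     if any(word in task_lower for word in ["read", "view", "display", "show"]):
--         candidates.append("read")
--     if any(word in task_lower for word in ["write", "create", "save"]):
--         candidates.append("write")
--     if any(word in task_lower for word in ["edit", "modify", "change", "update"]):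
--         candidates.append("edit")
--     if any(word in task_lower for word in ["search", "find", "grep"]):
--         candidates.append("grep")
--     if any(word in task_lower for word in ["execute", "run", "command"]):
--         candidates.append("bash")
--
--     # Add defaults if not enough candidates
--     if len(candidates) < 2:
--         candidates.extend(["read", "write"])
--
--     return candidates[:max_tools]
-- ===== SOURCE B (Python) =====
-- from typing import Any, Dict, List, Optional
--
-- # keyword -> tool, multi-pattern scan table
-- _KEYWORD_TOOL = [
--     ("read", "read"), ("view", "read"), ("display", "read"), ("show", "read"),
--     ("write", "write"), ("create", "write"), ("save", "write"),
--     ("edit", "edit"), ("modify", "edit"), ("change", "edit"), ("update", "edit"),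
--     ("search", "grep"), ("find", "grep"), ("grep", "grep"),
--     ("execute", "bash"), ("run", "bash"), ("command", "bash"),
-- ]
-- _TOOL_ORDER = ["read", "write", "edit", "grep", "bash"]
--
-- def _find_task_relevant_tools(task_description: str, max_tools: int) -> List[str]:
--     """Find tools relevant to a specific task (mock implementation)."""
--     text = task_description.lower()
--     # single left-to-right scan of the text: at each position try every keyword,
--     # recording the tool of any keyword that starts there
--     hits = set()
--     for i in range(len(text)):
--         for kw, tool in _KEYWORD_TOOL:
--             if text.startswith(kw, i):
--                 hits.add(tool)
--     candidates = [t for t in _TOOL_ORDER if t in hits]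
--     if len(candidates) < 2:
--         candidates.extend(["read", "write"])
--     return candidates[:max_tools]
-- ===== Notes on version B (the rewrite author's own statement) =====
-- stated objective: alternative
-- what changed: Instead of testing each tool's keyword list with substring membership, B scans the lowercased text once position by position, matching a flat keyword->tool table at each position into a set of hit tools, then emits tools in canonical order from that set; default fill and slice unchanged.
import Mathlib
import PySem

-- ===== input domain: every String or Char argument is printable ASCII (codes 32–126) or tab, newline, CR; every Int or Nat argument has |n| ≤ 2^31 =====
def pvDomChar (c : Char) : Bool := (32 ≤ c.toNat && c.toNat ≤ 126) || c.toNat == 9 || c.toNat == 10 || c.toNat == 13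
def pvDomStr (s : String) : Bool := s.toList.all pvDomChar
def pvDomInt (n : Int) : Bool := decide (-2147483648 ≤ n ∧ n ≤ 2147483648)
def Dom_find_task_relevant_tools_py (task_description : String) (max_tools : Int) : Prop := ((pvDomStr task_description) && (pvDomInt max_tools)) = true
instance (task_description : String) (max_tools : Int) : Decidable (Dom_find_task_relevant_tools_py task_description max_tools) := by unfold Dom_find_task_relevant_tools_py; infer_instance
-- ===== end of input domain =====

-- B replaces A's per-tool substring tests by a single positional scan of the lowercased text
-- against a flat keyword->tool table, collecting hit tools in a set and emitting them in
-- canonical order (alternative algorithm; same asymptotic cost).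


-- ===== PORT A =====
def find_task_relevant_tools_py (task_description : String) (max_tools : Int) : List String :=
  let task_lower := PySem.Str.lower task_description
  let candidates : List String := []
  let candidates := if ["read", "view", "display", "show"].any (fun w => PySem.Str.isIn w task_lower) then candidates ++ ["read"] else candidates
  let candidates := if ["write", "create", "save"].any (fun w => PySem.Str.isIn w task_lower) then candidates ++ ["write"] else candidates
  let candidates := if ["edit", "modify", "change", "update"].any (fun w => PySem.Str.isIn w task_lower) then candidates ++ ["edit"] else candidates
  let candidates := if ["search", "find", "grep"].any (fun w => PySem.Str.isIn w task_lower) then candidates ++ ["grep"] else candidates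
  let candidates := if ["execute", "run", "command"].any (fun w => PySem.Str.isIn w task_lower) then candidates ++ ["bash"] else candidates
  let candidates := if candidates.length < 2 then candidates ++ ["read", "write"] else candidates
  PySem.List.slice candidates none (some max_tools)

-- ===== PORT B =====
def pvKwTool : List (String × String) :=
  [("read", "read"), ("view", "read"), ("display", "read"), ("show", "read"),
   ("write", "write"), ("create", "write"), ("save", "write"),
   ("edit", "edit"), ("modify", "edit"), ("change", "edit"), ("update", "edit"),
   ("search", "grep"), ("find", "grep"), ("grep", "grep"),
   ("execute", "bash"), ("run", "bash"), ("command", "bash")]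

def pvToolOrder : List String := ["read", "write", "edit", "grep", "bash"]

-- the positional scan: at each index i of the text, every keyword starting there records its tool
def pvHits (text : List Char) : PySem.Set String :=
  (List.range text.length).foldl
    (fun s i => pvKwTool.foldl
      (fun s p => if PySem.Chars.startswith (text.drop i) p.1.toList then PySem.Set.add s p.2 else s) s)
    PySem.Set.empty

def find_task_relevant_tools_py_alt (task_description : String) (max_tools : Int) : List String :=
  let text := (PySem.Str.lower task_description).toList
  let hits := pvHits text
  let candidates := pvToolOrder.filter (fun t => PySem.Set.contains hits t)
  let candidates := if candidates.length < 2 then candidates ++ ["read", "write"] else candidates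
  PySem.List.slice candidates none (some max_tools)

-- ===== PRECONDITION & SPEC =====
def Spec_find_task_relevant_tools_py (task_description : String) (max_tools : Int) (out : List String) : Prop := out = find_task_relevant_tools_py_alt task_description max_tools
instance (task_description : String) (max_tools : Int) (out : List String) : Decidable (Spec_find_task_relevant_tools_py task_description max_tools out) := by unfold Spec_find_task_relevant_tools_py; infer_instance

-- ===== CLAIM (what is proved, stated in full; the proofs are below) =====
def Claim_equal_find_task_relevant_tools_py : Prop := ∀ (task_description : String) (max_tools : Int), Dom_find_task_relevant_tools_py task_description max_tools → Spec_find_task_relevant_tools_py task_description max_tools (find_task_relevant_tools_py task_description max_tools)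

-- ===== LEMMAS AND PROOFS =====

theorem pv_mem_foldl_step {α β : Type} (step : List α → β → List α) (P : β → α → Prop)
    (h : ∀ s b x, x ∈ step s b ↔ x ∈ s ∨ P b x) :
    ∀ (l : List β) (s0 : List α) (x : α), x ∈ l.foldl step s0 ↔ x ∈ s0 ∨ ∃ b ∈ l, P b x := by
  intro l
  induction l with
  | nil => intro s0 x; simp
  | cons b l ih =>
    intro s0 x
    rw [List.foldl_cons, ih, h]
    simp only [List.mem_cons]
    constructor
    · rintro ((hx | hp) | ⟨b', hb', hP⟩)
      · exact Or.inl hx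
      · exact Or.inr ⟨b, Or.inl rfl, hp⟩
      · exact Or.inr ⟨b', Or.inr hb', hP⟩
    · rintro (hx | ⟨b', (rfl | hb'), hP⟩)
      · exact Or.inl (Or.inl hx)
      · exact Or.inl (Or.inr hP)
      · exact Or.inr ⟨b', hb', hP⟩

theorem pv_mem_inner (text : List Char) (i : ℕ) (s0 : List String) (x : String) :
    x ∈ pvKwTool.foldl
      (fun s p => if PySem.Chars.startswith (text.drop i) p.1.toList then PySem.Set.add s p.2 else s) s0 ↔
    x ∈ s0 ∨ ∃ p ∈ pvKwTool, PySem.Chars.startswith (text.drop i) p.1.toList = true ∧ p.2 = x := by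
  refine pv_mem_foldl_step
    (fun s p => if PySem.Chars.startswith (text.drop i) p.1.toList then PySem.Set.add s p.2 else s)
    (fun p x => PySem.Chars.startswith (text.drop i) p.1.toList = true ∧ p.2 = x)
    (fun s p x => ?_) pvKwTool s0 x
  by_cases h : PySem.Chars.startswith (text.drop i) p.1.toList = true
  · simp [h, PySem.Set.mem_add]; tauto
  · simp [h]

theorem pv_scan_keyword (text kw : List Char) (hkw : kw ≠ []) :
    (∃ i ∈ List.range text.length, PySem.Chars.startswith (text.drop i) kw = true) ↔
      PySem.Chars.isIn kw text = true := by
  rw [← PySem.Chars.exists_prefix_drop_iff_isIn]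
  constructor
  · rintro ⟨i, -, h⟩
    exact ⟨i, (PySem.Chars.startswith_iff _ _).mp h⟩
  · rintro ⟨j, h⟩
    have hj : j < text.length := by
      by_contra hge
      rw [not_lt] at hge
      rw [List.drop_eq_nil_of_le hge] at h
      exact hkw (List.prefix_nil.mp h)
    exact ⟨j, List.mem_range.mpr hj, (PySem.Chars.startswith_iff _ _).mpr h⟩

theorem pv_kw_ne_nil (p : String × String) (hp : p ∈ pvKwTool) : (p.1.toList : List Char) ≠ [] := by
  have h : ∀ q ∈ pvKwTool, (q.1.toList : List Char) ≠ [] := by decide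
  exact h p hp

theorem pv_mem_pvHits (text : List Char) (x : String) :
    x ∈ pvHits text ↔ ∃ p ∈ pvKwTool, p.2 = x ∧ PySem.Chars.isIn p.1.toList text = true := by
  unfold pvHits
  rw [pv_mem_foldl_step _
      (fun i x => ∃ p ∈ pvKwTool, PySem.Chars.startswith (text.drop i) p.1.toList = true ∧ p.2 = x)
      (fun s i x => pv_mem_inner text i s x)]
  have hempty : x ∈ (PySem.Set.empty : PySem.Set String) ↔ False := by
    simp [PySem.Set.empty]
  constructor
  · rintro (he | ⟨i, hi, p, hp, hsw, rfl⟩)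
    · exact absurd he (by simp [PySem.Set.empty])
    · have hkw : (p.1.toList : List Char) ≠ [] := by
        fin_cases hp <;> simp
      exact ⟨p, hp, rfl, (pv_scan_keyword text p.1.toList hkw).mp ⟨i, hi, hsw⟩⟩
  · rintro ⟨p, hp, rfl, hin⟩
    obtain ⟨i, hi, hsw⟩ := (pv_scan_keyword text p.1.toList (pv_kw_ne_nil p hp)).mpr hin
    exact Or.inr ⟨i, hi, p, hp, hsw, rfl⟩

theorem pv_contains_pvHits (text : List Char) (t : String) (W : List String)
    (hW : ∀ w : String, w ∈ W ↔ (w, t) ∈ pvKwTool) :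
    PySem.Set.contains (pvHits text) t = W.any (fun w => PySem.Chars.isIn w.toList text) := by
  rw [Bool.eq_iff_iff, PySem.Set.contains_iff, pv_mem_pvHits, List.any_eq_true]
  constructor
  · rintro ⟨p, hp, rfl, hin⟩
    exact ⟨p.1, (hW p.1).mpr hp, hin⟩
  · rintro ⟨w, hw, hin⟩
    exact ⟨(w, t), (hW w).mp hw, rfl, hin⟩

-- ===== VERDICT (by name: the statement is the Claim_ definition above) =====
set_option maxHeartbeats 2000000 in
theorem find_task_relevant_tools_py_spec : Claim_equal_find_task_relevant_tools_py := by
  intro td mt _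
  unfold Spec_find_task_relevant_tools_py find_task_relevant_tools_py find_task_relevant_tools_py_alt pvToolOrder
  have hc := fun t W h => pv_contains_pvHits (PySem.Str.lower td).toList t W h
  have h1 := hc "read" ["read", "view", "display", "show"] (by intro w; simp [pvKwTool])
  have h2 := hc "write" ["write", "create", "save"] (by intro w; simp [pvKwTool])
  have h3 := hc "edit" ["edit", "modify", "change", "update"] (by intro w; simp [pvKwTool])
  have h4 := hc "grep" ["search", "find", "grep"] (by intro w; simp [pvKwTool])
  have h5 := hc "bash" ["execute", "run", "command"] (by intro w; simp [pvKwTool])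
  simp only [List.filter_cons, List.filter_nil, h1, h2, h3, h4, h5, PySem.Str.isIn_eq]
  split_ifs <;> simp_all
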